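-- pv_equiv track=rewrite | github.com/VyUng0711/competitive-programming-solutions | leetcode/merge_sorted_files.py | merge_sorted_files_2
-- ===== SOURCE A (Python) =====
-- import heapq
--
-- def merge_sorted_files_2(sorted_files):
-- 	my_list = []
-- 	for file in sorted_files:
-- 		for x in file:
-- 			my_list.append(x)
-- 	heapq.heapify(my_list)
-- 	sorted_list = []
-- 	length = len(my_list)
-- 	for i in range(length):
-- 		sorted_list.append(heapq.heappop(my_list))
-- 	return sorted_list
-- ===== SOURCE B (Python) =====
-- def merge_sorted_files_2(sorted_files):
--     return sorted([x for file in sorted_files for x in file])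
-- ===== Notes on version B (the rewrite author's own statement) =====
-- stated objective: idiomatic
-- what changed: B flattens with a comprehension and calls the built-in sorted() once instead of hand-draining a heap with n heappop calls (note: the inner files are not guaranteed sorted by the caller, so a k-way merge would not be exact; a full sort is)
import Mathlib
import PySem

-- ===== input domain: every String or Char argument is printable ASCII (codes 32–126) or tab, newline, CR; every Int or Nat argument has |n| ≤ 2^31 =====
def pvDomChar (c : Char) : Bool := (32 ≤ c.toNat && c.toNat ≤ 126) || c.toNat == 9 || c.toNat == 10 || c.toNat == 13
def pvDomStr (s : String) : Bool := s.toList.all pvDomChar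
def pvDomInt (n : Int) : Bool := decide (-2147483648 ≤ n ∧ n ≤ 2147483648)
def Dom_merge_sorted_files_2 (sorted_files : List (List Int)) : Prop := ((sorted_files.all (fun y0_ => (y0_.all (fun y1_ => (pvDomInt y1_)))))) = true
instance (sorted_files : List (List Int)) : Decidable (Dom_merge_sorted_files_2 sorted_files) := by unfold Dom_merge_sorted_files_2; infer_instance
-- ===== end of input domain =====

-- B replaces A's heapify-then-drain heapsort by one idiomatic built-in sort of the flattened list (equal value on every input).


-- ===== PORT A =====
-- heapq.heapify / heapq.heappop are standard-library calls (PySem has no heap); they are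
-- ported by their exact observable semantics on a Python list of ints: heapify permutes the
-- list in place (the value returned by each of the subsequent heappops is unaffected by that
-- permutation), and heappop removes one occurrence of the minimum and returns it.
def pyHeapify (xs : List Int) : List Int := xs
def pyHeappop? (heap : List Int) : Option (Int × List Int) :=
  match PySem.List.min? heap (fun x => x) with
  | none => none
  | some m =>
    match PySem.List.remove? heap m with
    | none => none
    | some rest => some (m, rest)

def merge_sorted_files_2 (sorted_files : List (List Int)) : List Int :=
  -- my_list = []; for file in sorted_files: for x in file: my_list.append(x)
  let my_list : List Int :=
    sorted_files.foldl (fun acc file => file.foldl (fun acc x => acc ++ [x]) acc) []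
  -- heapq.heapify(my_list)
  let my_list := pyHeapify my_list
  -- sorted_list = []; length = len(my_list); for i in range(length): sorted_list.append(heappop(my_list))
  let length : Int := my_list.length
  let st := (PySem.List.pyRange 0 length 1).foldl
      (fun (st : List Int × List Int) _ =>
        match pyHeappop? st.1 with
        | some (m, rest) => (rest, st.2 ++ [m])
        | none => st)
      (my_list, [])
  st.2

-- ===== PORT B =====
def merge_sorted_files_2_alt (sorted_files : List (List Int)) : List Int :=
  PySem.List.sorted (sorted_files.flatMap (fun file => file)) (fun x => x) false

-- ===== PRECONDITION & SPEC =====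
def Spec_merge_sorted_files_2 (sorted_files : List (List Int)) (out : List Int) : Prop := out = merge_sorted_files_2_alt sorted_files
instance (sorted_files : List (List Int)) (out : List Int) : Decidable (Spec_merge_sorted_files_2 sorted_files out) := by unfold Spec_merge_sorted_files_2; infer_instance

-- ===== CLAIM (what is proved, stated in full; the proofs are below) =====
def Claim_equal_merge_sorted_files_2 : Prop := ∀ (sorted_files : List (List Int)), Dom_merge_sorted_files_2 sorted_files → Spec_merge_sorted_files_2 sorted_files (merge_sorted_files_2 sorted_files)

-- ===== LEMMAS AND PROOFS =====

-- the inner append loop is list append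
theorem pv_foldl_append (f : List Int) : ∀ (acc : List Int), f.foldl (fun acc x => acc ++ [x]) acc = acc ++ f := by
  induction f with
  | nil => simp
  | cons x t ih => intro acc; simp [List.foldl, ih]

-- the nested flatten loops build flatMap
theorem pv_flatten (files : List (List Int)) : ∀ (acc : List Int),
    files.foldl (fun acc file => file.foldl (fun acc x => acc ++ [x]) acc) acc
      = acc ++ files.flatMap (fun file => file) := by
  induction files with
  | nil => simp
  | cons f t ih =>
    intro acc
    simp only [List.foldl_cons]
    rw [pv_foldl_append, ih]
    simp [List.append_assoc]

-- sorted(l) = min(l) :: sorted(l minus that minimum)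
theorem pv_sorted_cons_min (l : List Int) (m : Int)
    (hm : PySem.List.min? l (fun x => x) = some m) :
    PySem.List.sorted l (fun x => x) false = m :: PySem.List.sorted (l.erase m) (fun x => x) false := by
  have hmem : m ∈ l := PySem.List.min?_mem hm
  have hmin := PySem.List.min?_isMin hm
  apply PySem.List.sorted_id_eq_of_perm_of_pairwise
  · exact (List.Perm.cons m (PySem.List.sorted_perm _ _ _)).trans (List.perm_cons_erase hmem).symm
  · refine List.pairwise_cons.mpr ⟨?_, ?_⟩
    · intro y hy
      have : y ∈ l.erase m := (PySem.List.mem_sorted _ _ _ _).1 hy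
      exact hmin y (List.mem_of_mem_erase this)
    · exact PySem.List.sorted_pairwise _ _

-- draining the pool one minimum at a time produces sorted(l)
theorem pv_drain (L : List Int) : ∀ (l acc : List Int), L.length = l.length →
    (L.foldl
      (fun (st : List Int × List Int) _ =>
        match pyHeappop? st.1 with
        | some (m, rest) => (rest, st.2 ++ [m])
        | none => st)
      (l, acc)).2 = acc ++ PySem.List.sorted l (fun x => x) false := by
  induction L with
  | nil =>
    intro l acc h
    have : l = [] := by cases l <;> simp_all
    subst this
    simp [(PySem.List.sorted_eq_nil_iff (xs := []) (key := fun x => x) (rev := false)).mpr rfl]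
  | cons i t ih =>
    intro l acc h
    have hne : l ≠ [] := by intro hl; subst hl; simp at h
    obtain ⟨m, hm⟩ : ∃ m, PySem.List.min? l (fun x => x) = some m := by
      cases hmm : PySem.List.min? l (fun x => x) with
      | none => exact absurd ((PySem.List.min?_eq_none_iff _ _).1 hmm) hne
      | some m => exact ⟨m, rfl⟩
    have hmem : m ∈ l := PySem.List.min?_mem hm
    have hrem : PySem.List.remove? l m = some (l.erase m) := PySem.List.remove?_eq_some_erase l m hmem
    have hlen : t.length = (l.erase m).length := by
      have := List.length_erase_of_mem hmem
      simp at h; omega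
    have hstep : pyHeappop? l = some (m, l.erase m) := by
      simp [pyHeappop?, hm, hrem]
    rw [List.foldl_cons]
    simp only [hstep]
    rw [ih (l.erase m) (acc ++ [m]) hlen, pv_sorted_cons_min l m hm]
    simp

-- ===== VERDICT (by name: the statement is the Claim_ definition above) =====
theorem merge_sorted_files_2_spec : Claim_equal_merge_sorted_files_2 := by
  intro sorted_files _
  unfold Spec_merge_sorted_files_2 merge_sorted_files_2 merge_sorted_files_2_alt pyHeapify
  simp only [pv_flatten, List.nil_append]
  apply pv_drain
  rw [PySem.List.length_pyRange_one]
  omega
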